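-- pv_equiv track=rewrite | github.com/birc-gsa-2022/project-1-python-ms-world-wides | src/naive.py | naive_runner
-- ===== SOURCE A (Python) =====
-- def naive_align(x, p):
--
--     match_indexes = []
--     for i in range(len(x)-len(p)+1):
--         for j, el_p in enumerate(p):
--             if x[i+j]!=el_p:
--                 break
--         else:
--             match_indexes.append(i+1)
--
--     return match_indexes
--
-- def output(x_name, p_name, i, p):
--     '''Function that takes the name of sequence x to which the pattern p (p_name) has been exactly
--     aligned at index i. The function prints the data in a simple sam-format'''
--
--     return '\t'.join([p_name, x_name, str(i), f'{str(len(p))}M', p])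
--
-- def naive_runner(fasta_dict, fastq_dict):
--
--     string = ''
--     for p_key, p_val in fastq_dict.items():
--         for x_key, x_val in fasta_dict.items():
--             matches = naive_align(x_val, p_val)
--             for i in matches:
--                 string += output(x_key, p_key, i, p_val) + '\n'
--
--     return string
-- ===== SOURCE B (Python) =====
-- def naive_runner(fasta_dict, fastq_dict):
--     lines = []
--     for p_name, p in fastq_dict.items():
--         cigar = str(len(p)) + 'M'
--         for x_name, x in fasta_dict.items():
--             start = x.find(p)
--             while start != -1:
--                 lines.append(p_name + '\t' + x_name + '\t' + str(start + 1) + '\t' + cigar + '\t' + p + '\n')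
--                 start = x.find(p, start + 1)
--     return ''.join(lines)
-- ===== Notes on version B (the rewrite author's own statement) =====
-- stated objective: faster
-- what changed: B replaces the hand-written per-position character-comparison scan with repeated str.find calls that jump from one occurrence to the next, and builds the output by collecting lines and joining once instead of += string concatenation.
import Mathlib
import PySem

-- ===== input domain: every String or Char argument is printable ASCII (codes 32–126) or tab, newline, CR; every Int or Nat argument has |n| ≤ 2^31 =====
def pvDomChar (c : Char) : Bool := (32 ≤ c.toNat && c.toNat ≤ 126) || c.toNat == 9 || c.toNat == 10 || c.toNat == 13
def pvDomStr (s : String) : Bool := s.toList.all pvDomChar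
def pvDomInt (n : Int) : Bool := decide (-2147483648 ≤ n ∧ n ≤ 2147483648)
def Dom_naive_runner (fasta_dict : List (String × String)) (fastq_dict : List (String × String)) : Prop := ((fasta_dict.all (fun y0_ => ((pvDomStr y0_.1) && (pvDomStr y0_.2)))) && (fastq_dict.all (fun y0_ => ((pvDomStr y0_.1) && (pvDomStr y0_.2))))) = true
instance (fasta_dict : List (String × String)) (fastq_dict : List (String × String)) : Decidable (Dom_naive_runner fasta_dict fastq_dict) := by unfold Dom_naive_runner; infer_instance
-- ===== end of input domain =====

-- B enumerates pattern occurrences with repeated str.find jumps (library search) instead of A's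
-- per-position character-comparison scan, and joins collected lines once instead of += concatenation.


-- ===== PORT A =====
-- inner 'for j, el_p in enumerate(p): if x[i+j] != el_p: break / else:' — true iff the loop did
-- not break (pyGetD is exact here: A only reads indices that are in range)
def pvAlignInner (x : List Char) (i : Int) : List (Int × Char) → Bool
  | [] => true
  | (j, c) :: rest => if PySem.List.pyGetD x (i + j) ' ' ≠ c then false else pvAlignInner x i rest

def pvNaiveAlign (x p : List Char) : List Int :=
  (PySem.List.pyRange 0 ((x.length : Int) - (p.length : Int) + 1) 1).foldl
    (fun acc i => if pvAlignInner x i (PySem.List.enumerate p 0) then acc ++ [i + 1] else acc) []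

-- '\t'.join([p_name, x_name, str(i), f'{str(len(p))}M', p])
def pvOutput (x_name p_name : List Char) (i : Int) (p : List Char) : List Char :=
  PySem.Chars.join "\t".toList
    [p_name, x_name, PySem.Int.toChars i, PySem.Int.toChars (p.length : Int) ++ "M".toList, p]

def naive_runner (fasta_dict : List (String × String)) (fastq_dict : List (String × String)) : String :=
  String.ofList (fastq_dict.foldl (fun acc pkv =>
    fasta_dict.foldl (fun acc xkv =>
      (pvNaiveAlign xkv.2.toList pkv.2.toList).foldl
        (fun acc i => acc ++ pvOutput xkv.1.toList pkv.1.toList i pkv.2.toList ++ "\n".toList)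
        acc) acc) [])

-- ===== PORT B =====
-- one output line: p_name + '\t' + x_name + '\t' + str(start+1) + '\t' + cigar + '\t' + p + '\n'
def pvLine (p_name x_name : List Char) (start : Int) (cigar p : List Char) : List Char :=
  p_name ++ "\t".toList ++ x_name ++ "\t".toList ++ PySem.Int.toChars (start + 1) ++ "\t".toList
    ++ cigar ++ "\t".toList ++ p ++ "\n".toList

-- 'while start != -1: append line; start = x.find(p, start+1)'; fuel only makes the loop total
-- (each found index is strictly larger, so x.length + 2 steps always suffice)
def pvFindLoop (x p p_name x_name cigar : List Char) : Nat → Int → List (List Char) → List (List Char)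
  | 0, _, lines => lines
  | fuel + 1, start, lines =>
    if start = -1 then lines
    else pvFindLoop x p p_name x_name cigar fuel (PySem.Chars.findFrom x p (start + 1) none)
           (lines ++ [pvLine p_name x_name start cigar p])

def naive_runner_alt (fasta_dict : List (String × String)) (fastq_dict : List (String × String)) : String :=
  String.ofList ((fastq_dict.foldl (fun lines pkv =>
    let cigar := PySem.Int.toChars (PySem.Str.len pkv.2) ++ "M".toList
    fasta_dict.foldl (fun lines xkv =>
      pvFindLoop xkv.2.toList pkv.2.toList pkv.1.toList xkv.1.toList cigar
        (xkv.2.toList.length + 2) (PySem.Chars.find xkv.2.toList pkv.2.toList) lines)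
      lines) []).flatten)

-- ===== PRECONDITION & SPEC =====
def Spec_naive_runner (fasta_dict : List (String × String)) (fastq_dict : List (String × String)) (out : String) : Prop := out = naive_runner_alt fasta_dict fastq_dict
instance (fasta_dict : List (String × String)) (fastq_dict : List (String × String)) (out : String) : Decidable (Spec_naive_runner fasta_dict fastq_dict out) := by unfold Spec_naive_runner; infer_instance

-- ===== CLAIM (what is proved, stated in full; the proofs are below) =====
def Claim_equal_naive_runner : Prop := ∀ (fasta_dict : List (String × String)) (fastq_dict : List (String × String)), Dom_naive_runner fasta_dict fastq_dict → Spec_naive_runner fasta_dict fastq_dict (naive_runner fasta_dict fastq_dict)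

-- ===== LEMMAS AND PROOFS =====

-- the occurrence positions of p in x from position k on, ascending, 0-based
def pvOccFrom (x p : List Char) (k : Nat) : List Nat :=
  (List.range' k (x.length + 1 - k)).filter (fun n => decide (p <+: x.drop n))

def pvOcc (x p : List Char) : List Nat := pvOccFrom x p 0

def pvPair (pkv xkv : String × String) : List (List Char) :=
  (pvOcc xkv.2.toList pkv.2.toList).map (fun n =>
    pvLine pkv.1.toList xkv.1.toList (n : Int)
      (PySem.Int.toChars (pkv.2.toList.length : Int) ++ "M".toList) pkv.2.toList)

lemma pvAlignInner_iff (x : List Char) (i : Int) (hi : 0 ≤ i) :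
    ∀ (q : List Char) (s : Int), 0 ≤ s → (i + s).toNat + q.length ≤ x.length →
      (pvAlignInner x i (PySem.List.enumerate q s) = true ↔ q <+: x.drop (i + s).toNat) := by
  intro q
  induction q with
  | nil => intro s _ _; simp [pvAlignInner, PySem.List.enumerate_nil]
  | cons c rest ih =>
    intro s hs h
    rw [PySem.List.enumerate_cons]
    have hlen : (i + s).toNat < x.length := by simp at h; omega
    have hcast : (i + (s + 1)).toNat = (i + s).toNat + 1 := by omega
    simp only [pvAlignInner]
    rw [PySem.List.pyGetD_eq_getElem x ' ' (by omega) (by exact_mod_cast by omega : i + s < (x.length : Int))]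
    rw [List.drop_eq_getElem_cons hlen, List.cons_prefix_cons]
    have ihs := ih (s + 1) (by omega) (by rw [hcast]; simp at h ⊢; omega)
    rw [hcast] at ihs
    split_ifs with hne
    · simp only [false_iff]
      rintro ⟨h1, -⟩; exact hne h1.symm
    · push Not at hne
      rw [ihs]; simp [hne]

lemma pvInfix_of_prefix_drop {p x : List Char} {k n : Nat} (hk : k ≤ n) (h : p <+: x.drop n) :
    p <:+: x.drop k := by
  obtain ⟨t, ht⟩ := h
  have hd : x.drop n = (x.drop k).drop (n - k) := by rw [List.drop_drop]; congr 1; omega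
  refine ⟨(x.drop k).take (n - k), t, ?_⟩
  rw [List.append_assoc, ht, hd, List.take_append_drop]

lemma pvNaiveAlign_eq (x p : List Char) :
    pvNaiveAlign x p = (pvOcc x p).map (fun n => (n : Int) + 1) := by
  unfold pvNaiveAlign pvOcc pvOccFrom
  rw [PySem.List.foldl_append_if (fun i => pvAlignInner x i (PySem.List.enumerate p 0)) (fun i => i + 1)]
  rw [List.nil_append]
  simp only [Nat.sub_zero, ← List.range_eq_range']
  have hnp : ∀ n, x.length - p.length + 1 ≤ n → n ≤ x.length → ¬ p <+: x.drop n := by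
    intro n hn hn2 hpre
    have h5 := hpre.length_le
    simp only [List.length_drop] at h5
    omega
  by_cases hP : p.length ≤ x.length
  · have h1 : (x.length : Int) - (p.length : Int) + 1 = ((x.length - p.length + 1 : Nat) : Int) := by
      push_cast [hP]; omega
    rw [h1, PySem.List.pyRange_zero_nat, List.filter_map]
    have h2 : ∀ n ∈ List.range (x.length - p.length + 1),
        ((fun i => pvAlignInner x i (PySem.List.enumerate p 0)) ∘ (fun k : Nat => (k : Int))) n
          = decide (p <+: x.drop n) := by
      intro n hn
      simp only [List.mem_range] at hn
      have := pvAlignInner_iff x (n : Int) (by omega) p 0 (by omega) (by simp; omega)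
      simp only [add_zero, Int.toNat_natCast] at this
      simp only [Function.comp_apply]
      rcases Bool.eq_false_or_eq_true (pvAlignInner x (n : Int) (PySem.List.enumerate p 0)) with hb | hb <;>
        simp [hb] at this ⊢ <;> simp [this]
    rw [List.filter_congr h2]
    have h3 : List.range (x.length + 1)
        = List.range (x.length - p.length + 1) ++ List.range' (x.length - p.length + 1) p.length := by
      rw [List.range_eq_range']
      rw [show x.length + 1 = (x.length - p.length + 1) + p.length from by omega]
      have := List.range'_append (s := 0) (m := x.length - p.length + 1) (n := p.length) (step := 1)
      simp only [one_mul, Nat.zero_add] at this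
      rw [← this, List.range_eq_range']
    rw [h3, List.filter_append]
    have h4 : (List.range' (x.length - p.length + 1) p.length).filter (fun n => decide (p <+: x.drop n)) = [] := by
      rw [List.filter_eq_nil_iff]
      intro n hn
      simp only [List.mem_range'] at hn
      simp only [decide_eq_true_eq]
      exact hnp n (by omega) (by omega)
    rw [h4, List.append_nil, List.map_map]
    simp [Function.comp_def, ← List.map_eq_flatMap]
  · rw [PySem.List.pyRange_one_eq_nil (by omega)]
    have h1 : (List.range (x.length + 1)).filter (fun n => decide (p <+: x.drop n)) = [] := by
      rw [List.filter_eq_nil_iff]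
      intro n hn
      simp only [decide_eq_true_eq]
      intro hpre
      have h5 := hpre.length_le
      simp only [List.length_drop] at h5
      omega
    simp [h1]

lemma pvFindFrom_past (x p : List Char) :
    PySem.Chars.findFrom x p ((x.length : Int) + 1) none = -1 := by
  simp only [PySem.Chars.findFrom]
  split_ifs <;> first | rfl | omega

lemma pvFindLoop_eq (x p pn xn cig : List Char) :
    ∀ (fuel k : Nat), k ≤ x.length + 1 → x.length + 2 - k ≤ fuel → ∀ lines,
      pvFindLoop x p pn xn cig fuel (PySem.Chars.findFrom x p (k : Int) none) lines
        = lines ++ (pvOccFrom x p k).map (fun n => pvLine pn xn (n : Int) cig p) := by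
  intro fuel
  induction fuel with
  | zero => intro k hk hf; omega
  | succ fuel ih =>
    intro k hk hf lines
    rcases Nat.lt_or_ge k (x.length + 1) with hklt | hkge
    · -- k ≤ x.length
      have hk' : k ≤ x.length := by omega
      by_cases hr : PySem.Chars.findFrom x p (k : Int) none = -1
      · rw [hr]
        simp only [pvFindLoop, if_pos]
        have hocc : pvOccFrom x p k = [] := by
          unfold pvOccFrom
          rw [List.filter_eq_nil_iff]
          intro n hn
          simp only [List.mem_range'] at hn
          simp only [decide_eq_true_eq]
          intro hpre
          exact ((PySem.Chars.findFrom_natCast_eq_neg_one_iff x p k hk').mp hr)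
            (pvInfix_of_prefix_drop (by omega) hpre)
        simp [hocc]
      · obtain ⟨hle, hpre, hmin⟩ := PySem.Chars.findFrom_natCast_spec x p k hk' hr
        set r := PySem.Chars.findFrom x p (k : Int) none with hrdef
        have hrle : r ≤ (x.length : Int) := by
          rw [hrdef, PySem.Chars.findFrom_natCast x p k hk'] at *
          split_ifs with hfind
          · omega
          · have := PySem.Chars.find_le_length (x.drop k) p
            simp only [List.length_drop] at this
            omega
        have hr0 : (0 : Int) ≤ r := le_trans (by positivity) hle
        have hrcast : ((r.toNat : Int)) = r := Int.toNat_of_nonneg hr0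
        have hmle : r.toNat ≤ x.length := by omega
        -- unfold one loop step
        simp only [pvFindLoop, if_neg hr]
        have hkr : k ≤ r.toNat := by omega
        have hnext : r + 1 = ((r.toNat + 1 : Nat) : Int) := by push_cast; omega
        rw [hnext, ih (r.toNat + 1) (by omega) (by omega)]
        -- split the occurrence list at r.toNat
        have hsplit : pvOccFrom x p k = r.toNat :: pvOccFrom x p (r.toNat + 1) := by
          unfold pvOccFrom
          have hR : List.range' k (x.length + 1 - k)
              = List.range' k (r.toNat - k) ++ List.range' r.toNat (x.length + 1 - r.toNat) := by
            have := List.range'_append (s := k) (m := r.toNat - k) (n := x.length + 1 - r.toNat) (step := 1)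
            simp only [one_mul] at this
            rw [show k + (r.toNat - k) = r.toNat from by omega] at this
            rw [show x.length + 1 - k = (r.toNat - k) + (x.length + 1 - r.toNat) from by omega]
            exact this.symm
          rw [hR, List.filter_append]
          have h1 : (List.range' k (r.toNat - k)).filter (fun n => decide (p <+: x.drop n)) = [] := by
            rw [List.filter_eq_nil_iff]
            intro n hn
            simp only [List.mem_range'] at hn
            simp only [decide_eq_true_eq]
            exact hmin n (by omega) (by omega)
          rw [h1, List.nil_append]
          rw [show x.length + 1 - r.toNat = (x.length - r.toNat) + 1 from by omega, List.range'_succ]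
          rw [List.filter_cons]
          simp only [hpre, decide_true, if_pos]
          rw [show x.length - r.toNat = x.length + 1 - (r.toNat + 1) from by omega]
        rw [hsplit]
        simp [hrcast]
    · -- k = x.length + 1
      have hkeq : k = x.length + 1 := by omega
      have : PySem.Chars.findFrom x p (k : Int) none = -1 := by
        rw [hkeq]; push_cast; exact pvFindFrom_past x p
      rw [this]
      simp only [pvFindLoop, if_pos]
      have : pvOccFrom x p k = [] := by
        unfold pvOccFrom
        rw [hkeq]
        simp
      simp [this]

lemma pvLine_eq (pn xn : List Char) (n : Int) (p : List Char) :
    pvOutput xn pn (n + 1) p ++ "\n".toList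
      = pvLine pn xn n (PySem.Int.toChars (p.length : Int) ++ "M".toList) p := by
  simp [pvOutput, pvLine, PySem.Chars.join, List.intercalate, List.intersperse]

lemma pvStepA (pkv xkv : String × String) (acc : List Char) :
    (pvNaiveAlign xkv.2.toList pkv.2.toList).foldl
      (fun acc i => acc ++ pvOutput xkv.1.toList pkv.1.toList i pkv.2.toList ++ "\n".toList) acc
      = acc ++ (pvPair pkv xkv).flatten := by
  rw [pvNaiveAlign_eq, List.foldl_map]
  simp only [List.append_assoc]
  rw [PySem.List.foldl_append_eq_flatMap
    (fun n => pvOutput xkv.1.toList pkv.1.toList ((n : Int) + 1) pkv.2.toList ++ "\n".toList)]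
  congr 1
  rw [show (do let a ← pvOcc xkv.2.toList pkv.2.toList; pure ((a : Int)))
      = (pvOcc xkv.2.toList pkv.2.toList).map (fun n : Nat => (n : Int)) from List.map_eq_flatMap.symm]
  rw [List.flatMap_map]
  have hfun : (fun n : Nat => pvOutput xkv.1.toList pkv.1.toList ((n : Int) + 1) pkv.2.toList ++ "\n".toList)
      = fun n : Nat => pvLine pkv.1.toList xkv.1.toList (n : Int)
          (PySem.Int.toChars (pkv.2.toList.length : Int) ++ "M".toList) pkv.2.toList :=
    funext fun n => pvLine_eq _ _ _ _
  rw [hfun, List.flatMap_def]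
  simp [pvPair, ← List.map_eq_flatMap, List.map_map, Function.comp_def]

lemma pvStepB (pkv xkv : String × String) (lines : List (List Char)) :
    pvFindLoop xkv.2.toList pkv.2.toList pkv.1.toList xkv.1.toList
      (PySem.Int.toChars (PySem.Str.len pkv.2) ++ "M".toList)
      (xkv.2.toList.length + 2) (PySem.Chars.find xkv.2.toList pkv.2.toList) lines
      = lines ++ pvPair pkv xkv := by
  rw [show PySem.Chars.find xkv.2.toList pkv.2.toList
      = PySem.Chars.findFrom xkv.2.toList pkv.2.toList ((0 : Nat) : Int) none from by
    simp [PySem.Chars.findFrom_zero]]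
  rw [pvFindLoop_eq _ _ _ _ _ _ 0 (by omega) (by omega)]
  simp [pvPair, pvOcc, PySem.Str.len_eq]

lemma pvFlatten_flatMap {α β : Type} (f : α → List (List β)) (l : List α) :
    (l.flatMap f).flatten = l.flatMap (fun a => (f a).flatten) := by
  induction l with
  | nil => simp
  | cons a l ih => simp [List.flatMap_cons, List.flatten_append, ih]

-- ===== VERDICT (by name: the statement is the Claim_ definition above) =====
theorem naive_runner_spec : Claim_equal_naive_runner := by
  intro fasta fastq _
  unfold Spec_naive_runner naive_runner naive_runner_alt
  simp only [pvStepA, pvStepB, PySem.List.foldl_append_eq_flatMap, List.nil_append,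
    pvFlatten_flatMap]
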